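-- pv_equiv track=rewrite | github.com/arpanguin/CompetitiveProgramming-git | program/RectangleMania.py | rectangleCount
-- ===== SOURCE A (Python) =====
-- def rectangleCount(coords, coordsTable):
--     rectangle_count = 0
--     for x1, y1 in coords:
--         for x2, y2 in coords:
--             if not isUpperRight([x1, y1], [x2, y2]):
--                 continue
--             upperCoordsString = coordToString([x1, y2])
--             rightCoordsString = coordToString([x2, y1])
--             if upperCoordsString in coordsTable and rightCoordsString in coordsTable:
--                 rectangle_count += 1
--     return rectangle_count
--
-- def isUpperRight(coord1, coord2):
--     x1, y1 = coord1
--     x2, y2 = coord2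
--     return x2 > x1 and y2 > y1
--
-- def coordToString(coord):
--     x, y = coord
--     return str(x) + "-" + str(y)
-- ===== SOURCE B (Python) =====
-- def coordToString(coord):
--     x, y = coord
--     return str(x) + "-" + str(y)
--
-- def rectangleCount(coords, coordsTable):
--     # Prefix-sum sweep over the coordinate grid: a multiplicity counter of the
--     # points, sorted distinct x and y values, and for each y-pair (y1 < y2) one
--     # increasing-x sweep keeping a running sum of admissible bottom-left
--     # weights; each top-right column multiplies against that prefix, so the
--     # inner scan over x1 disappears.
--     cnt = {}
--     for p in coords:
--         cnt[p] = cnt.get(p, 0) + 1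
--     xs = sorted(set(x for x, _ in coords))
--     ys = sorted(set(y for _, y in coords))
--     table = set(coordsTable)
--     total = 0
--     for y1 in ys:
--         for y2 in ys:
--             if y1 < y2:
--                 prefix = 0
--                 for x in xs:
--                     if coordToString([x, y1]) in table:
--                         total += prefix * cnt.get((x, y2), 0)
--                     if coordToString([x, y2]) in table:
--                         prefix += cnt.get((x, y1), 0)
--     return total
-- ===== Notes on version B (the rewrite author's own statement) =====
-- stated objective: alternative
-- what changed: B replaces A's scan over all ordered point pairs by a grid sweep: it builds a point-multiplicity counter and sorted distinct x/y values, and for each pair y1<y2 performs one increasing-x prefix-sum sweep in which each column's top-right weight multiplies the running sum of earlier bottom-left weights, so the inner x1 scan disappears and duplicates contribute by multiplicity products.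
import Mathlib
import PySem

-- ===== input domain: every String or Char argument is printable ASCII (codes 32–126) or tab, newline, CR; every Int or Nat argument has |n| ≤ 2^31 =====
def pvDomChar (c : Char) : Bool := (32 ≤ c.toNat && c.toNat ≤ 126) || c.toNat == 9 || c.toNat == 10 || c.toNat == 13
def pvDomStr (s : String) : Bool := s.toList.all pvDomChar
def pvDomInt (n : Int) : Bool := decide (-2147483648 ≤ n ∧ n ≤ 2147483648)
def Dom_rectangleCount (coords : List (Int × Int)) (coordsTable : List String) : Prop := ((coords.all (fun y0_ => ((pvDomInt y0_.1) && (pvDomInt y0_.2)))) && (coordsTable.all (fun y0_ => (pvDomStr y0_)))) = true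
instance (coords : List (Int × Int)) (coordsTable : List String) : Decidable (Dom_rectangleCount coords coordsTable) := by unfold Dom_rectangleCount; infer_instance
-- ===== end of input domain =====

-- B replaces A's scan over all ordered point pairs by a prefix-sum sweep over the coordinate grid
-- (multiplicity counter, sorted distinct x/y values, one increasing-x sweep per y-pair);
-- alternative decomposition, return values proved equal.

-- ===== PORT A =====
def coordToString (x y : Int) : String := PySem.Int.toStr x ++ "-" ++ PySem.Int.toStr y

def isUpperRight (c1 c2 : Int × Int) : Bool := decide (c1.1 < c2.1) && decide (c1.2 < c2.2)

def rectangleCount (coords : List (Int × Int)) (coordsTable : List String) : Int :=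
  coords.foldl (fun acc p =>
    coords.foldl (fun acc q =>
      if !(isUpperRight p q) then acc
      else if coordToString p.1 q.2 ∈ coordsTable ∧ coordToString q.1 p.2 ∈ coordsTable
      then acc + 1 else acc) acc) 0

-- ===== PORT B =====
def rectangleCount_alt (coords : List (Int × Int)) (coordsTable : List String) : Int :=
  let cnt : PySem.Dict (Int × Int) Int :=
    coords.foldl (fun d p => d.modify p 0 (· + 1)) PySem.Dict.empty
  let xs := PySem.List.sorted (PySem.Set.ofList (coords.map Prod.fst)) (fun x => x) false
  let ys := PySem.List.sorted (PySem.Set.ofList (coords.map Prod.snd)) (fun y => y) false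
  let table := PySem.Set.ofList coordsTable
  ys.foldl (fun total y1 =>
    ys.foldl (fun total y2 =>
      if y1 < y2 then
        (xs.foldl (fun (s : Int × Int) x =>
          (if coordToString x y1 ∈ table then s.1 + s.2 * cnt.getD (x, y2) 0 else s.1,
           if coordToString x y2 ∈ table then s.2 + cnt.getD (x, y1) 0 else s.2))
          (total, 0)).1
      else total) total) 0

-- ===== PRECONDITION & SPEC =====
def Spec_rectangleCount (coords : List (Int × Int)) (coordsTable : List String) (out : Int) : Prop := out = rectangleCount_alt coords coordsTable
instance (coords : List (Int × Int)) (coordsTable : List String) (out : Int) : Decidable (Spec_rectangleCount coords coordsTable out) := by unfold Spec_rectangleCount; infer_instance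

-- ===== CLAIM (what is proved, stated in full; the proofs are below) =====
def Claim_equal_rectangleCount : Prop := ∀ (coords : List (Int × Int)) (coordsTable : List String), Dom_rectangleCount coords coordsTable → Spec_rectangleCount coords coordsTable (rectangleCount coords coordsTable)

-- ===== LEMMAS AND PROOFS =====

-- per-pair contribution: 1 iff (p, q) is a bottom-left/top-right diagonal whose other corners' strings are in T
def rcF (T : List String) (p q : Int × Int) : Int :=
  if p.1 < q.1 ∧ p.2 < q.2 ∧ coordToString p.1 q.2 ∈ T ∧ coordToString q.1 p.2 ∈ T then 1 else 0

-- sum of a·b over ordered (index) pairs of a list: what one prefix-sum sweep accumulates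
def Spairs (a b : Int → Int) : List Int → Int
  | [] => 0
  | x :: t => a x * (t.map b).sum + Spairs a b t

-- the sorted distinct values of a coordinate list
def sCoords (l : List Int) : List Int := PySem.List.sorted (PySem.Set.ofList l) (fun x => x) false

lemma A_eq_sum (coords : List (Int × Int)) (T : List String) :
    rectangleCount coords T
      = (coords.map (fun p => (coords.map (rcF T p)).sum)).sum := by
  unfold rectangleCount
  have hstep : ∀ p : Int × Int,
      (fun (acc : Int) q => if !(isUpperRight p q) then acc
        else if coordToString p.1 q.2 ∈ T ∧ coordToString q.1 p.2 ∈ T then acc + 1 else acc)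
      = fun acc q => acc + rcF T p q := by
    intro p; funext acc q
    by_cases h1 : p.1 < q.1 <;> by_cases h2 : p.2 < q.2 <;>
      simp [isUpperRight, rcF, h1, h2] <;> split_ifs <;> omega
  have houter : (fun (acc : Int) p => coords.foldl (fun acc q =>
      if !(isUpperRight p q) then acc
      else if coordToString p.1 q.2 ∈ T ∧ coordToString q.1 p.2 ∈ T then acc + 1 else acc) acc)
      = fun acc p => acc + (coords.map (rcF T p)).sum := by
    funext acc p
    rw [hstep p, PySem.List.foldl_add]
  rw [houter, PySem.List.foldl_add]
  simp

lemma sweep_fold (a b : Int → Int) (xs : List Int) : ∀ (t0 p0 : Int),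
    (xs.foldl (fun s x => (s.1 + s.2 * b x, s.2 + a x)) (t0, p0)).1
      = t0 + p0 * (xs.map b).sum + Spairs a b xs := by
  induction xs with
  | nil => intro t0 p0; simp [Spairs]
  | cons x t ih =>
      intro t0 p0
      simp only [List.foldl_cons, ih, List.map_cons, List.sum_cons, Spairs]
      ring

lemma sum_delta (f : Int → Int) (l : List Int) (h : l.Nodup) (a : Int) (ha : a ∈ l) :
    (l.map (fun x => if x = a then f x else 0)).sum = f a := by
  induction l with
  | nil => cases ha
  | cons b t ih =>
      rcases List.nodup_cons.1 h with ⟨hb, ht⟩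
      rcases List.mem_cons.1 ha with h1 | h1
      · subst h1
        have hz : (t.map (fun x => if x = a then f x else 0)).sum = 0 := by
          apply List.sum_eq_zero
          intro y hy
          rcases List.mem_map.1 hy with ⟨x, hx, rfl⟩
          have : x ≠ a := fun e => hb (e ▸ hx)
          simp [this]
        simp [hz]
      · have : b ≠ a := fun e => hb (e ▸ h1)
        simp [this, ih ht h1]

lemma sum_grid (L : List (Int × Int)) (xs ys : List Int) (g : Int → Int → Int)
    (hx : xs.Nodup) (hy : ys.Nodup)
    (hLx : ∀ p ∈ L, p.1 ∈ xs) (hLy : ∀ p ∈ L, p.2 ∈ ys) :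
    (L.map (fun p => g p.1 p.2)).sum
      = (xs.map (fun x => (ys.map (fun y => (L.count (x, y) : Int) * g x y)).sum)).sum := by
  induction L with
  | nil => simp
  | cons p t ih =>
      have ht := ih (fun q hq => hLx q (List.mem_cons_of_mem _ hq))
        (fun q hq => hLy q (List.mem_cons_of_mem _ hq))
      have hcount : ∀ x y : Int, (((p :: t).count (x, y) : Int))
          = (t.count (x, y) : Int) + (if x = p.1 ∧ y = p.2 then 1 else 0) := by
        intro x y
        rw [List.count_cons]
        by_cases h : (x, y) = p
        · have h1 : x = p.1 ∧ y = p.2 := by cases p; cases h; exact ⟨rfl, rfl⟩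
          simp [h, h1]
        · have h1 : ¬(x = p.1 ∧ y = p.2) := by
            rintro ⟨e1, e2⟩; exact h (by cases p; simp_all)
          have h2 : ¬ p = (x, y) := fun hc => h hc.symm
          simp [h1, h2]
      have hdelta : (xs.map (fun x => (ys.map (fun y =>
            (if x = p.1 ∧ y = p.2 then 1 else 0) * g x y)).sum)).sum = g p.1 p.2 := by
        have hinner : ∀ x : Int, (ys.map (fun y =>
            (if x = p.1 ∧ y = p.2 then 1 else 0) * g x y)).sum
            = if x = p.1 then g x p.2 else 0 := by
          intro x
          by_cases hxc : x = p.1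
          · have : (fun y => (if x = p.1 ∧ y = p.2 then 1 else 0) * g x y)
                = fun y => if y = p.2 then g x y else 0 := by
              funext y; by_cases hyc : y = p.2 <;> simp [hxc, hyc]
            rw [this, sum_delta (g x) ys hy p.2 (hLy p (List.mem_cons_self))]
            simp [hxc]
          · have : (fun y => (if x = p.1 ∧ y = p.2 then 1 else 0) * g x y)
                = fun _ => (0 : Int) := by
              funext y; simp [hxc]
            simp [this, hxc]
        calc (xs.map (fun x => (ys.map (fun y =>
              (if x = p.1 ∧ y = p.2 then 1 else 0) * g x y)).sum)).sum
            = (xs.map (fun x => if x = p.1 then g x p.2 else 0)).sum := by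
              exact congrArg List.sum (List.map_congr_left (fun x _ => hinner x))
          _ = g p.1 p.2 := sum_delta (fun x => g x p.2) xs hx p.1 (hLx p List.mem_cons_self)
      simp only [List.map_cons, List.sum_cons, ht]
      rw [show (fun x => (ys.map (fun y => ((p :: t).count (x, y) : Int) * g x y)).sum)
          = fun x => (ys.map (fun y => (t.count (x, y) : Int) * g x y
              + (if x = p.1 ∧ y = p.2 then 1 else 0) * g x y)).sum from
          funext (fun x => congrArg List.sum (List.map_congr_left (fun y _ => by
            rw [hcount x y]; ring)))]
      simp only [List.sum_map_add]
      rw [hdelta]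
      ring

lemma Spairs_eq_lt (a b : Int → Int) (xs : List Int) (h : xs.Pairwise (· < ·)) :
    Spairs a b xs
      = (xs.map (fun x1 => (xs.map (fun x2 => if x1 < x2 then a x1 * b x2 else 0)).sum)).sum := by
  induction xs with
  | nil => simp [Spairs]
  | cons x t ih =>
      rcases List.pairwise_cons.1 h with ⟨hx, ht⟩
      have hhead2 : (List.map (fun x2 => if x < x2 then a x * b x2 else 0) t).sum
          = a x * (t.map b).sum := by
        rw [List.map_congr_left (fun z hz => if_pos (hx z hz))]
        rw [← List.sum_map_mul_left]
      have houter : (List.map (fun x1 => (if x1 < x then a x1 * b x else 0)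
            + (List.map (fun x2 => if x1 < x2 then a x1 * b x2 else 0) t).sum) t)
          = List.map (fun x1 => (List.map (fun x2 => if x1 < x2 then a x1 * b x2 else 0) t).sum) t :=
        List.map_congr_left (fun z hz => by
          rw [if_neg (by have := hx z hz; omega)]; ring)
      simp only [Spairs, List.map_cons, List.sum_cons, ih ht]
      rw [if_neg (lt_irrefl x), houter, hhead2]
      ring

lemma sum_comm' {α β : Type} (l : List α) (l' : List β) (f : α → β → Int) :
    (l.map (fun a => (l'.map (fun b => f a b)).sum)).sum
  = (l'.map (fun b => (l.map (fun a => f a b)).sum)).sum := by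
  induction l with
  | nil => simp
  | cons a t ih => simp only [List.map_cons, List.sum_cons, ih, ← List.sum_map_add]

lemma sCoords_nodup (l : List Int) : (sCoords l).Nodup :=
  (PySem.List.sorted_perm (PySem.Set.ofList l) (fun x => x) false).nodup_iff.mpr
    (PySem.Set.nodup_ofList l)

lemma sCoords_mem (l : List Int) (x : Int) (h : x ∈ l) : x ∈ sCoords l := by
  unfold sCoords
  rw [PySem.List.mem_sorted, PySem.Set.mem_ofList]
  exact h

lemma sCoords_pairwise (l : List Int) : (sCoords l).Pairwise (· < ·) := by
  have hle : (sCoords l).Pairwise (fun a b => (fun x => x) a ≤ (fun x => x) b) :=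
    PySem.List.sorted_pairwise (PySem.Set.ofList l) (fun x => x)
  have hnd : (sCoords l).Nodup := sCoords_nodup l
  exact (hle.and hnd).imp (fun h => lt_of_le_of_ne h.1 h.2)

-- B as the guarded quadruple sum
lemma B_eq_sum (coords : List (Int × Int)) (T : List String) :
    rectangleCount_alt coords T
      = ((sCoords (coords.map Prod.snd)).map (fun y1 =>
          ((sCoords (coords.map Prod.snd)).map (fun y2 =>
            if y1 < y2 then
              Spairs (fun x => if coordToString x y2 ∈ T then (coords.count (x, y1) : Int) else 0)
                     (fun x => if coordToString x y1 ∈ T then (coords.count (x, y2) : Int) else 0)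
                     (sCoords (coords.map Prod.fst))
            else 0)).sum)).sum := by
  have hcnt : coords.foldl (fun d p => d.modify p 0 (· + 1)) PySem.Dict.empty
      = PySem.Dict.counter coords := (PySem.Dict.counter_eq_foldl coords).symm
  show (PySem.List.sorted (PySem.Set.ofList (coords.map Prod.snd)) (fun y => y) false).foldl _ 0 = _
  have hxs : PySem.List.sorted (PySem.Set.ofList (coords.map Prod.fst)) (fun x => x) false
      = sCoords (coords.map Prod.fst) := rfl
  have hys : PySem.List.sorted (PySem.Set.ofList (coords.map Prod.snd)) (fun y => y) false
      = sCoords (coords.map Prod.snd) := rfl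
  set xs := sCoords (coords.map Prod.fst)
  set ys := sCoords (coords.map Prod.snd)
  rw [hxs, hys]
  have hsweep : ∀ (y1 y2 total : Int),
      (xs.foldl (fun (s : Int × Int) x =>
        (if coordToString x y1 ∈ PySem.Set.ofList T then
            s.1 + s.2 * (coords.foldl (fun d p => d.modify p 0 (· + 1)) PySem.Dict.empty).getD (x, y2) 0 else s.1,
         if coordToString x y2 ∈ PySem.Set.ofList T then
            s.2 + (coords.foldl (fun d p => d.modify p 0 (· + 1)) PySem.Dict.empty).getD (x, y1) 0 else s.2))
        (total, 0)).1
      = total + Spairs (fun x => if coordToString x y2 ∈ T then (coords.count (x, y1) : Int) else 0)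
                       (fun x => if coordToString x y1 ∈ T then (coords.count (x, y2) : Int) else 0) xs := by
    intro y1 y2 total
    have hstep : (fun (s : Int × Int) x =>
        (if coordToString x y1 ∈ PySem.Set.ofList T then
            s.1 + s.2 * (coords.foldl (fun d p => d.modify p 0 (· + 1)) PySem.Dict.empty).getD (x, y2) 0 else s.1,
         if coordToString x y2 ∈ PySem.Set.ofList T then
            s.2 + (coords.foldl (fun d p => d.modify p 0 (· + 1)) PySem.Dict.empty).getD (x, y1) 0 else s.2))
        = fun (s : Int × Int) x =>
          (s.1 + s.2 * (if coordToString x y1 ∈ T then (coords.count (x, y2) : Int) else 0),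
           s.2 + (if coordToString x y2 ∈ T then (coords.count (x, y1) : Int) else 0)) := by
      funext s x
      rw [hcnt]
      simp only [PySem.Dict.getD_counter, PySem.Set.mem_ofList]
      by_cases h1 : coordToString x y1 ∈ T <;> by_cases h2 : coordToString x y2 ∈ T <;>
        simp [h1, h2]
    rw [hstep, sweep_fold]
    ring
  have hinner : ∀ (y1 total : Int),
      (ys.foldl (fun total y2 =>
        if y1 < y2 then
          (xs.foldl (fun (s : Int × Int) x =>
            (if coordToString x y1 ∈ PySem.Set.ofList T then
                s.1 + s.2 * (coords.foldl (fun d p => d.modify p 0 (· + 1)) PySem.Dict.empty).getD (x, y2) 0 else s.1,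
             if coordToString x y2 ∈ PySem.Set.ofList T then
                s.2 + (coords.foldl (fun d p => d.modify p 0 (· + 1)) PySem.Dict.empty).getD (x, y1) 0 else s.2))
            (total, 0)).1
        else total) total)
      = total + (ys.map (fun y2 =>
          if y1 < y2 then
            Spairs (fun x => if coordToString x y2 ∈ T then (coords.count (x, y1) : Int) else 0)
                   (fun x => if coordToString x y1 ∈ T then (coords.count (x, y2) : Int) else 0) xs
          else 0)).sum := by
    intro y1 total
    have : (fun (total : Int) y2 =>
        if y1 < y2 then
          (xs.foldl (fun (s : Int × Int) x =>
            (if coordToString x y1 ∈ PySem.Set.ofList T then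
                s.1 + s.2 * (coords.foldl (fun d p => d.modify p 0 (· + 1)) PySem.Dict.empty).getD (x, y2) 0 else s.1,
             if coordToString x y2 ∈ PySem.Set.ofList T then
                s.2 + (coords.foldl (fun d p => d.modify p 0 (· + 1)) PySem.Dict.empty).getD (x, y1) 0 else s.2))
            (total, 0)).1
        else total)
        = fun total y2 => total + (if y1 < y2 then
            Spairs (fun x => if coordToString x y2 ∈ T then (coords.count (x, y1) : Int) else 0)
                   (fun x => if coordToString x y1 ∈ T then (coords.count (x, y2) : Int) else 0) xs
          else 0) := by
      funext total y2
      by_cases hy : y1 < y2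
      · rw [if_pos hy, if_pos hy, hsweep]
      · rw [if_neg hy, if_neg hy]; ring
    rw [this, PySem.List.foldl_add]
  have houter : (fun (total y1 : Int) =>
      ys.foldl (fun total y2 =>
        if y1 < y2 then
          (xs.foldl (fun (s : Int × Int) x =>
            (if coordToString x y1 ∈ PySem.Set.ofList T then
                s.1 + s.2 * (coords.foldl (fun d p => d.modify p 0 (· + 1)) PySem.Dict.empty).getD (x, y2) 0 else s.1,
             if coordToString x y2 ∈ PySem.Set.ofList T then
                s.2 + (coords.foldl (fun d p => d.modify p 0 (· + 1)) PySem.Dict.empty).getD (x, y1) 0 else s.2))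
            (total, 0)).1
        else total) total)
      = fun total y1 => total + (ys.map (fun y2 =>
          if y1 < y2 then
            Spairs (fun x => if coordToString x y2 ∈ T then (coords.count (x, y1) : Int) else 0)
                   (fun x => if coordToString x y1 ∈ T then (coords.count (x, y2) : Int) else 0) xs
          else 0)).sum := funext fun total => funext fun y1 => hinner y1 total
  rw [houter, PySem.List.foldl_add]
  simp

-- A as the multiplicity-weighted quadruple sum over the grid
lemma A_eq_quad (coords : List (Int × Int)) (T : List String) :
    (coords.map (fun p => (coords.map (rcF T p)).sum)).sum
      = ((sCoords (coords.map Prod.fst)).map (fun x1 =>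
          ((sCoords (coords.map Prod.snd)).map (fun y1 =>
            ((sCoords (coords.map Prod.fst)).map (fun x2 =>
              ((sCoords (coords.map Prod.snd)).map (fun y2 =>
                (coords.count (x1, y1) : Int) *
                  ((coords.count (x2, y2) : Int) * rcF T (x1, y1) (x2, y2)))).sum)).sum)).sum)).sum := by
  set xs := sCoords (coords.map Prod.fst) with hxs
  set ys := sCoords (coords.map Prod.snd) with hys
  have hx : xs.Nodup := sCoords_nodup _
  have hy : ys.Nodup := sCoords_nodup _
  have hmx : ∀ p ∈ coords, p.1 ∈ xs := fun p hp =>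
    sCoords_mem _ _ (List.mem_map_of_mem hp)
  have hmy : ∀ p ∈ coords, p.2 ∈ ys := fun p hp =>
    sCoords_mem _ _ (List.mem_map_of_mem hp)
  have h1 : (coords.map (fun p => (coords.map (rcF T p)).sum)).sum
      = (xs.map (fun x1 => (ys.map (fun y1 =>
          (coords.count (x1, y1) : Int) * (coords.map (rcF T (x1, y1))).sum)).sum)).sum :=
    sum_grid coords xs ys (fun x y => (coords.map (rcF T (x, y))).sum) hx hy hmx hmy
  rw [h1]
  apply congrArg List.sum
  apply List.map_congr_left
  intro x1 _
  apply congrArg List.sum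
  apply List.map_congr_left
  intro y1 _
  have h2 : (coords.map (rcF T (x1, y1))).sum
      = (xs.map (fun x2 => (ys.map (fun y2 =>
          (coords.count (x2, y2) : Int) * rcF T (x1, y1) (x2, y2))).sum)).sum :=
    sum_grid coords xs ys (fun x2 y2 => rcF T (x1, y1) (x2, y2)) hx hy hmx hmy
  rw [h2, ← List.sum_map_mul_left]
  apply congrArg List.sum
  apply List.map_congr_left
  intro x2 _
  rw [← List.sum_map_mul_left]

-- the two quadruple sums agree pointwise after reordering
lemma AB_eq (coords : List (Int × Int)) (T : List String) :
    rectangleCount coords T = rectangleCount_alt coords T := by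
  rw [A_eq_sum, B_eq_sum, A_eq_quad]
  set xs := sCoords (coords.map Prod.fst) with hxs
  set ys := sCoords (coords.map Prod.snd) with hys
  -- B side: expand Spairs on the strictly increasing xs
  have hBpt : ∀ y1 y2 : Int,
      (if y1 < y2 then
        Spairs (fun x => if coordToString x y2 ∈ T then (coords.count (x, y1) : Int) else 0)
               (fun x => if coordToString x y1 ∈ T then (coords.count (x, y2) : Int) else 0) xs
      else 0)
      = (xs.map (fun x1 => (xs.map (fun x2 =>
          if y1 < y2 then (if x1 < x2 then
            (if coordToString x1 y2 ∈ T then (coords.count (x1, y1) : Int) else 0) *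
            (if coordToString x2 y1 ∈ T then (coords.count (x2, y2) : Int) else 0) else 0) else 0)).sum)).sum := by
    intro y1 y2
    by_cases hy : y1 < y2
    · rw [if_pos hy, Spairs_eq_lt _ _ xs (sCoords_pairwise _)]
      simp only [if_pos hy]
    · rw [if_neg hy]
      simp only [if_neg hy]
      simp
  have hB : ((ys.map (fun y1 => (ys.map (fun y2 =>
        if y1 < y2 then
          Spairs (fun x => if coordToString x y2 ∈ T then (coords.count (x, y1) : Int) else 0)
                 (fun x => if coordToString x y1 ∈ T then (coords.count (x, y2) : Int) else 0) xs
        else 0)).sum)).sum)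
      = (ys.map (fun y1 => (ys.map (fun y2 => (xs.map (fun x1 => (xs.map (fun x2 =>
          if y1 < y2 then (if x1 < x2 then
            (if coordToString x1 y2 ∈ T then (coords.count (x1, y1) : Int) else 0) *
            (if coordToString x2 y1 ∈ T then (coords.count (x2, y2) : Int) else 0) else 0) else 0)).sum)).sum)).sum)).sum := by
    apply congrArg List.sum
    apply List.map_congr_left
    intro y1 _
    apply congrArg List.sum
    apply List.map_congr_left
    intro y2 _
    exact hBpt y1 y2
  rw [hB]
  -- pointwise: the A summand equals the guarded product
  have hpt : ∀ x1 y1 x2 y2 : Int,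
      (coords.count (x1, y1) : Int) * ((coords.count (x2, y2) : Int) * rcF T (x1, y1) (x2, y2))
      = if y1 < y2 then (if x1 < x2 then
          (if coordToString x1 y2 ∈ T then (coords.count (x1, y1) : Int) else 0) *
          (if coordToString x2 y1 ∈ T then (coords.count (x2, y2) : Int) else 0) else 0) else 0 := by
    intro x1 y1 x2 y2
    unfold rcF
    by_cases h1 : x1 < x2 <;> by_cases h2 : y1 < y2 <;>
      by_cases h3 : coordToString x1 y2 ∈ T <;> by_cases h4 : coordToString x2 y1 ∈ T <;>
      simp [h1, h2, h3, h4]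
  -- reorder the A-side quadruple sum from (x1, y1, x2, y2) to (y1, y2, x1, x2)
  have hswap1 : ∀ x1 : Int,
      (ys.map (fun y1 => (xs.map (fun x2 => (ys.map (fun y2 =>
        (coords.count (x1, y1) : Int) * ((coords.count (x2, y2) : Int) * rcF T (x1, y1) (x2, y2)))).sum)).sum)).sum
    = (ys.map (fun y1 => (ys.map (fun y2 => (xs.map (fun x2 =>
        (coords.count (x1, y1) : Int) * ((coords.count (x2, y2) : Int) * rcF T (x1, y1) (x2, y2)))).sum)).sum)).sum := by
    intro x1
    apply congrArg List.sum
    apply List.map_congr_left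
    intro y1 _
    exact sum_comm' xs ys _
  calc (xs.map (fun x1 => (ys.map (fun y1 => (xs.map (fun x2 => (ys.map (fun y2 =>
        (coords.count (x1, y1) : Int) * ((coords.count (x2, y2) : Int) * rcF T (x1, y1) (x2, y2)))).sum)).sum)).sum)).sum
      = (xs.map (fun x1 => (ys.map (fun y1 => (ys.map (fun y2 => (xs.map (fun x2 =>
        (coords.count (x1, y1) : Int) * ((coords.count (x2, y2) : Int) * rcF T (x1, y1) (x2, y2)))).sum)).sum)).sum)).sum := by
        apply congrArg List.sum
        exact List.map_congr_left (fun x1 _ => hswap1 x1)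
    _ = (ys.map (fun y1 => (xs.map (fun x1 => (ys.map (fun y2 => (xs.map (fun x2 =>
        (coords.count (x1, y1) : Int) * ((coords.count (x2, y2) : Int) * rcF T (x1, y1) (x2, y2)))).sum)).sum)).sum)).sum :=
        sum_comm' xs ys _
    _ = (ys.map (fun y1 => (ys.map (fun y2 => (xs.map (fun x1 => (xs.map (fun x2 =>
        (coords.count (x1, y1) : Int) * ((coords.count (x2, y2) : Int) * rcF T (x1, y1) (x2, y2)))).sum)).sum)).sum)).sum := by
        apply congrArg List.sum
        apply List.map_congr_left
        intro y1 _
        exact sum_comm' xs ys _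
    _ = (ys.map (fun y1 => (ys.map (fun y2 => (xs.map (fun x1 => (xs.map (fun x2 =>
          if y1 < y2 then (if x1 < x2 then
            (if coordToString x1 y2 ∈ T then (coords.count (x1, y1) : Int) else 0) *
            (if coordToString x2 y1 ∈ T then (coords.count (x2, y2) : Int) else 0) else 0) else 0)).sum)).sum)).sum)).sum := by
        apply congrArg List.sum
        apply List.map_congr_left
        intro y1 _
        apply congrArg List.sum
        apply List.map_congr_left
        intro y2 _
        apply congrArg List.sum
        apply List.map_congr_left
        intro x1 _
        apply congrArg List.sum
        apply List.map_congr_left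
        intro x2 _
        exact hpt x1 y1 x2 y2

-- ===== VERDICT (by name: the statement is the Claim_ definition above) =====
theorem rectangleCount_spec : Claim_equal_rectangleCount := by
  intro coords T _
  unfold Spec_rectangleCount
  exact AB_eq coords T
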